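-- pv_equiv track=rewrite | github.com/cshung/Competition | rosalind/revp.py | modified_manacher
-- ===== SOURCE A (Python) =====
-- def complement(n):
--   if n == 'A':
--     return 'T'
--   elif n == 'C':
--     return 'G'
--   elif n == 'G':
--     return 'C'
--   elif n == 'T':
--     return 'A'
--
-- def modified_manacher(dna):
--   half_lengths = [0] * len(dna)
--   rightmost_palindrome_center = 0
--   rightmost_palindrome_half_length = 0
--   # For each center, we have a loop to find its longest half length
--   for center in range(1, len(dna)):
--     # Leveraging the information we already knew
--     # We can make some inferences:
--     #
--     # Names  :     R     Q       P p       q     r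
--     # String : . . . A A A | A A A a a a | a a a .
--     #
--     # Suppose the current rightmost palindrome has center p with length (r - p)
--     # and we want to know the half length for q.
--     #
--     # We know (R, P] = [p, r), and we also knew the half length for Q + 1 (*), so
--     # we will have some hint about the half length of q.
--     #
--     # (*) Remember center is defined to be the character after the actual center
--     #
--     # In particular, q's half length is at least min(half_length(Q + 1), r - q), it
--     # could be longer. The rest is just simple arithmetic to compute it:
--     #
--     # q - p = (P - Q)
--     # Q + 1 = P - q + p + 1
--     #       = 2p - q - 1 + 1
--     #       = 2p - q
--     #
--     # Of course, this apply only if q in [p, r)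
--     #
--     p = rightmost_palindrome_center
--     r = rightmost_palindrome_center + rightmost_palindrome_half_length
--     q = center
--     if p <= q and q < r:
--       half_length = min(half_lengths[2 * p - q], r - q)
--     else:
--       half_length = 0
--     while True:
--       next_right = center + half_length
--       next_left = center - half_length - 1
--       if next_left >= 0 and next_right < len(dna) and dna[next_left] == complement(dna[next_right]):
--         half_length = half_length + 1
--       else:
--         break
--     half_lengths[center] = half_length
--     right = center + half_length
--     if right > rightmost_palindrome_center + rightmost_palindrome_half_length:
--       rightmost_palindrome_center = center
--       rightmost_palindrome_half_length = half_length
--   return half_lengths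
-- ===== SOURCE B (Python) =====
-- def complement(n):
--   if n == 'A':
--     return 'T'
--   elif n == 'C':
--     return 'G'
--   elif n == 'G':
--     return 'C'
--   elif n == 'T':
--     return 'A'
--
-- def lcp(xs, ys):
--   k = 0
--   for x, y in zip(xs, ys):
--     if y != x:
--       break
--     k += 1
--   return k
--
-- def modified_manacher(dna):
--   comp = [complement(x) for x in dna]
--   # at center c: longest common prefix of the reversed prefix with the complemented suffix
--   return [lcp((dna[i] for i in range(c - 1, -1, -1)),
--               (comp[i] for i in range(c, len(dna))))
--           for c in range(len(dna))]
-- ===== Notes on version B (the rewrite author's own statement) =====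
-- stated objective: alternative
-- what changed: Replaced Manacher's mirror-hint/rightmost-palindrome bookkeeping and index-arithmetic while-expansion by a precomputed complement list and, per center, the longest-common-prefix (zip with early break) of the lazily reversed prefix with the complemented suffix.
import Mathlib
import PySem

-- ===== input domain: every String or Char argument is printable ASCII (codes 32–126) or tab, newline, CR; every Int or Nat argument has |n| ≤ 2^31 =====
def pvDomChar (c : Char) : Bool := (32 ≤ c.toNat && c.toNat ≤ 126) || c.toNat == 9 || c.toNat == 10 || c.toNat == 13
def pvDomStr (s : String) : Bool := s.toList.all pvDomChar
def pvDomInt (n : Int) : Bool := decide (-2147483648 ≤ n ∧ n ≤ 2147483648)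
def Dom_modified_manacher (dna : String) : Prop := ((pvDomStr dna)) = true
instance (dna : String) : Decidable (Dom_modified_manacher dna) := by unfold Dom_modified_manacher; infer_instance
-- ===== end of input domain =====

-- B replaces Manacher's index-arithmetic expansion and mirror/rightmost bookkeeping by one
-- precomputed complement list and, per center, the longest common prefix of the reversed
-- prefix with the complemented suffix (objective: simpler; same return value, not faster).

-- ===== PORT A =====
-- complement(n): returns none for non-ACGT (Python returns None)
def pvComplement (c : Char) : Option Char :=
  if c = 'A' then some 'T'
  else if c = 'C' then some 'G'
  else if c = 'G' then some 'C'
  else if c = 'T' then some 'A'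
  else none

-- the guard of A's while loop: next_left >= 0 and next_right < len(dna)
-- and dna[next_left] == complement(dna[next_right])  (char-vs-None compares unequal)
def pvCond (dna : String) (nl nr : Int) : Bool :=
  decide (0 ≤ nl) && decide (nr < PySem.Str.len dna) &&
    (PySem.Str.pyGet? dna nl == (PySem.Str.pyGet? dna nr).bind pvComplement)

theorem pvCond_bounds {dna : String} {nl nr : Int} (h : pvCond dna nl nr = true) :
    0 ≤ nl ∧ nr < PySem.Str.len dna := by
  unfold pvCond at h
  simp only [Bool.and_eq_true, decide_eq_true_eq] at h
  exact ⟨h.1.1, h.1.2⟩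

-- the 'while True: … break' loop of A: expand from half_length h
def pvExpand (dna : String) (center h : Int) : Int :=
  if hc : pvCond dna (center - h - 1) (center + h) = true then
    pvExpand dna center (h + 1)
  else h
termination_by (PySem.Str.len dna + 1 - h).toNat
decreasing_by
  obtain ⟨h1, h2⟩ := pvCond_bounds hc
  have h3 : 0 ≤ PySem.Str.len dna := by simp [pysem]
  omega

-- one iteration of A's for-loop: state (half_lengths, center_p, half_len_p)
def pvStepA (dna : String) (st : List Int × Int × Int) (center : Int) :
    List Int × Int × Int :=
  let p := st.2.1
  let r := st.2.1 + st.2.2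
  let half0 : Int :=
    if p ≤ center ∧ center < r then
      min (PySem.List.pyGetD st.1 (2 * p - center) 0) (r - center)
    else 0
  let half := pvExpand dna center half0
  let hs' := PySem.List.pySetD st.1 center half
  if center + half > st.2.1 + st.2.2 then (hs', center, half) else (hs', st.2.1, st.2.2)

def modified_manacher (dna : String) : List Int :=
  ((PySem.List.pyRange 1 (PySem.Str.len dna) 1).foldl (pvStepA dna)
    (List.replicate (PySem.Str.len dna).toNat 0, 0, 0)).1

-- ===== PORT B =====
-- lcp(xs, ys): leading matches of zip(xs, ys); ys holds Option Char (complement may be None),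
-- xs plain chars — Python's y != x is some x ≠ y here
def pvLcp : List Char → List (Option Char) → Int
  | x :: xs, y :: ys => if y = some x then 1 + pvLcp xs ys else 0
  | _, _ => 0

-- the generator (dna[i] for i in range(c-1,-1,-1)) yields exactly the reversed prefix
-- (take c).reverse, and (comp[i] for i in range(c,len(dna))) yields exactly comp.drop c;
-- they are ported as those lists (laziness is unobservable: lcp reads the same values)
def modified_manacher_alt (dna : String) : List Int :=
  let comp := dna.toList.map pvComplement
  (List.range dna.toList.length).map (fun c =>
    pvLcp (dna.toList.take c).reverse (comp.drop c))

-- ===== PRECONDITION & SPEC =====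
def Spec_modified_manacher (dna : String) (out : List Int) : Prop := out = modified_manacher_alt dna
instance (dna : String) (out : List Int) : Decidable (Spec_modified_manacher dna out) := by unfold Spec_modified_manacher; infer_instance

-- ===== CLAIM (what is proved, stated in full; the proofs are below) =====
def Claim_equal_modified_manacher : Prop := ∀ (dna : String), Dom_modified_manacher dna → Spec_modified_manacher dna (modified_manacher dna)

-- ===== LEMMAS AND PROOFS =====

-- character at an Int index (total helper for the proofs)
def pvSg (dna : String) (i : Int) : Char := dna.toList.getD i.toNat 'X'

-- the expansion condition at center c, offset j
def pvCc (dna : String) (c j : Int) : Prop := pvCond dna (c - j - 1) (c + j) = true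

-- the common value both programs compute at center c
def pvM (dna : String) (c : Int) : Int := pvExpand dna c 0

theorem pvLen_eq (dna : String) : PySem.Str.len dna = (dna.toList.length : Int) := by
  simp [pysem]

theorem pvGet_eq {dna : String} {i : Int} (h0 : 0 ≤ i) (h1 : i < (dna.toList.length : Int)) :
    PySem.Str.pyGet? dna i = some (pvSg dna i) := by
  unfold pvSg
  simp only [PySem.Str.pyGet?_eq, PySem.Chars.pyGet?_eq_listPyGet?]
  rw [PySem.List.pyGet?_of_nonneg _ h0]
  rw [List.getElem?_eq_getElem (by omega), List.getD_eq_getElem _ _ (by omega)]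

theorem pvCc_iff {dna : String} {c j : Int} (hj : 0 ≤ j) :
    pvCc dna c j ↔ 0 ≤ c - j - 1 ∧ c + j < (dna.toList.length : Int) ∧
      pvComplement (pvSg dna (c + j)) = some (pvSg dna (c - j - 1)) := by
  unfold pvCc pvCond
  rw [pvLen_eq]
  simp only [Bool.and_eq_true, decide_eq_true_eq]
  constructor
  · rintro ⟨⟨hnl, hnr⟩, hbeq⟩
    rw [pvGet_eq hnl (by omega), pvGet_eq (by omega) hnr] at hbeq
    simp only [Option.bind] at hbeq
    exact ⟨hnl, hnr, ((beq_iff_eq).mp hbeq).symm⟩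
  · rintro ⟨hnl, hnr, heq⟩
    refine ⟨⟨hnl, hnr⟩, ?_⟩
    rw [pvGet_eq hnl (by omega), pvGet_eq (by omega) hnr]
    simp [heq]

theorem pvComplement_invol {a b : Char} (h : pvComplement a = some b) :
    pvComplement b = some a := by
  unfold pvComplement at h ⊢
  split_ifs at h <;> rw [Option.some_inj] at h <;> subst h <;> simp_all

theorem pvExpand_spec (dna : String) (c h : Int) :
    h ≤ pvExpand dna c h ∧ (∀ j, h ≤ j → j < pvExpand dna c h → pvCc dna c j) ∧
      ¬ pvCc dna c (pvExpand dna c h) := by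
  fun_induction pvExpand dna c h with
  | case1 h hc ih =>
    obtain ⟨ih1, ih2, ih3⟩ := ih
    refine ⟨by omega, ?_, ih3⟩
    intro j hj1 hj2
    rcases eq_or_lt_of_le hj1 with rfl | hlt
    · exact hc
    · exact ih2 j (by omega) hj2
  | case2 h hc => exact ⟨le_refl _, fun j hj1 hj2 => absurd hj2 (by omega), hc⟩

theorem pvExpand_step (dna : String) (c h : Int) (hc : pvCc dna c h) :
    pvExpand dna c h = pvExpand dna c (h + 1) := by
  rw [pvExpand]
  exact dif_pos hc

theorem pvExpand_shift (dna : String) (c : Int) (k : Nat)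
    (hall : ∀ j : Int, 0 ≤ j → j < (k : Int) → pvCc dna c j) :
    pvExpand dna c 0 = pvExpand dna c (k : Int) := by
  induction k with
  | zero => norm_num
  | succ k ih =>
    have h1 : pvExpand dna c 0 = pvExpand dna c (k : Int) :=
      ih (fun j hj1 hj2 => hall j hj1 (by push_cast; omega))
    have h2 := pvExpand_step dna c (k : Int) (hall _ (by positivity) (by push_cast; omega))
    push_cast
    rw [h1, h2]

theorem pvM_nonneg (dna : String) (c : Int) : 0 ≤ pvM dna c :=
  (pvExpand_spec dna c 0).1

theorem pvM_cond (dna : String) (c : Int) : ∀ j, 0 ≤ j → j < pvM dna c → pvCc dna c j :=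
  (pvExpand_spec dna c 0).2.1

theorem pvM_max (dna : String) (c : Int) : ¬ pvCc dna c (pvM dna c) :=
  (pvExpand_spec dna c 0).2.2

theorem pvExpand_hint (dna : String) (c h0 : Int) (hh : 0 ≤ h0)
    (hall : ∀ j : Int, 0 ≤ j → j < h0 → pvCc dna c j) :
    pvExpand dna c h0 = pvM dna c := by
  unfold pvM
  have := pvExpand_shift dna c h0.toNat (fun j hj1 hj2 => hall j hj1 (by omega))
  rw [this]
  congr 1
  omega

theorem pvM_zero (dna : String) : pvM dna 0 = 0 := by
  unfold pvM
  rw [pvExpand]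
  norm_num [pvCond]

theorem pvMirror (dna : String) (p c j : Int) (hpc : p ≤ c)
    (hc : c < p + pvM dna p) (hj : 0 ≤ j)
    (hjm : j < pvM dna (2 * p - c)) (hjr : j < p + pvM dna p - c) : pvCc dna c j := by
  have pal : ∀ i : Int, 0 ≤ i → i < pvM dna p →
      0 ≤ p - i - 1 ∧ p + i < (dna.toList.length : Int) ∧
        pvComplement (pvSg dna (p + i)) = some (pvSg dna (p - i - 1)) :=
    fun i a b => (pvCc_iff a).mp (pvM_cond dna p i a b)
  have hl1 : 1 ≤ pvM dna p := by omega
  obtain ⟨hb1, hb2, -⟩ := pal (pvM dna p - 1) (by omega) (by omega)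
  obtain ⟨hm1, hm2, hm3⟩ := (pvCc_iff hj).mp (pvM_cond dna (2 * p - c) j hj hjm)
  have e1 : pvComplement (pvSg dna (c + j)) = some (pvSg dna (2 * p - c - j - 1)) := by
    have h := (pal (c + j - p) (by omega) (by omega)).2.2
    rw [show p + (c + j - p) = c + j from by ring,
        show p - (c + j - p) - 1 = 2 * p - c - j - 1 from by ring] at h
    exact h
  have ecom : pvComplement (pvSg dna (2 * p - c + j)) = some (pvSg dna (c - j - 1)) := by
    by_cases hcase : p ≤ c - j - 1
    · have h := (pal (c - j - 1 - p) (by omega) (by omega)).2.2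
      rw [show p + (c - j - 1 - p) = c - j - 1 from by ring,
          show p - (c - j - 1 - p) - 1 = 2 * p - c + j from by ring] at h
      exact pvComplement_invol h
    · have h := (pal (p - c + j) (by omega) (by omega)).2.2
      rw [show p + (p - c + j) = 2 * p - c + j from by ring,
          show p - (p - c + j) - 1 = c - j - 1 from by ring] at h
      exact h
  have hsg : pvSg dna (c - j - 1) = pvSg dna (2 * p - c - j - 1) := by
    rw [ecom] at hm3
    exact Option.some_inj.mp hm3
  exact (pvCc_iff hj).mpr ⟨by omega, by omega, by rw [e1, hsg]⟩

-- the half_lengths list after centers < c have been processed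
def pvStateL (dna : String) (c : Int) : List Int :=
  (List.range dna.toList.length).map (fun q : Nat => if (q : Int) < c then pvM dna (q : Int) else 0)

theorem pvStateL_length (dna : String) (c : Int) :
    (pvStateL dna c).length = dna.toList.length := by
  simp [pvStateL]

theorem pvStateL_getElem (dna : String) (c : Int) (i : Nat)
    (hi : i < (pvStateL dna c).length) :
    (pvStateL dna c)[i] = if (i : Int) < c then pvM dna i else 0 := by
  unfold pvStateL
  simp only [List.getElem_map, List.getElem_range]

theorem pvStateL_get {dna : String} {c i : Int} (h0 : 0 ≤ i) (h1 : i < c)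
    (h2 : i < (dna.toList.length : Int)) :
    PySem.List.pyGetD (pvStateL dna c) i 0 = pvM dna i := by
  rw [PySem.List.pyGetD_eq_getElem _ _ h0 (by rw [pvStateL_length]; exact h2)]
  rw [pvStateL_getElem]
  rw [Int.toNat_of_nonneg h0, if_pos h1]

theorem pvStateL_set {dna : String} {c : Int} (h1 : 0 ≤ c) :
    PySem.List.pySetD (pvStateL dna c) c (pvM dna c) = pvStateL dna (c + 1) := by
  rw [PySem.List.pySetD_of_nonneg _ _ h1]
  apply List.ext_getElem
  · rw [List.length_set, pvStateL_length, pvStateL_length]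
  intro i hi1 hi2
  rw [List.getElem_set]
  have hi' : i < (pvStateL dna c).length := by
    rw [pvStateL_length]; simpa [pvStateL_length] using hi1
  rw [pvStateL_getElem _ _ _ hi', pvStateL_getElem _ _ _ hi2]
  split_ifs <;> first | rfl | (congr 1; omega)

theorem pvStep_good (dna : String) (c p hl : Int) (h1 : 1 ≤ c)
    (h2 : c < (dna.toList.length : Int)) (hp0 : 0 ≤ p) (hpc : p < c)
    (hhl : hl = pvM dna p) :
    ∃ p' hl' : Int,
      pvStepA dna (pvStateL dna c, p, hl) c = (pvStateL dna (c + 1), p', hl') ∧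
      0 ≤ p' ∧ p' < c + 1 ∧ hl' = pvM dna p' := by
  subst hhl
  have hhalf : pvExpand dna c
      (if p ≤ c ∧ c < p + pvM dna p then
        min (PySem.List.pyGetD (pvStateL dna c) (2 * p - c) 0) (p + pvM dna p - c)
      else 0) = pvM dna c := by
    by_cases hb : p ≤ c ∧ c < p + pvM dna p
    · have hMp1 : 1 ≤ pvM dna p := by omega
      obtain ⟨hq1, hq2, -⟩ := (pvCc_iff (by omega)).mp
        (pvM_cond dna p (pvM dna p - 1) (by omega) (by omega))
      have hget : PySem.List.pyGetD (pvStateL dna c) (2 * p - c) 0 = pvM dna (2 * p - c) :=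
        pvStateL_get (by omega) (by omega) (by omega)
      rw [if_pos hb, hget]
      refine pvExpand_hint _ _ _ (le_min (pvM_nonneg _ _) (by omega)) ?_
      intro j hj1 hj2
      exact pvMirror dna p c j hb.1 hb.2 hj1 (by omega) (by omega)
    · rw [if_neg hb]
      exact pvExpand_hint dna c 0 le_rfl (fun j ha hb => absurd hb (by omega))
  unfold pvStepA
  dsimp only
  rw [hhalf, pvStateL_set (by omega)]
  split_ifs with hgt
  · exact ⟨c, pvM dna c, rfl, by omega, by omega, rfl⟩
  · exact ⟨p, pvM dna p, rfl, hp0, by omega, rfl⟩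

theorem pvFold_inv (dna : String) (k : Nat)
    (hk : 1 + (k : Int) ≤ (dna.toList.length : Int)) :
    ∃ p hl : Int,
      (PySem.List.pyRange 1 (1 + (k : Int)) 1).foldl (pvStepA dna)
        (List.replicate dna.toList.length 0, 0, 0) = (pvStateL dna (1 + (k : Int)), p, hl) ∧
      0 ≤ p ∧ p < 1 + (k : Int) ∧ hl = pvM dna p := by
  induction k with
  | zero =>
    refine ⟨0, 0, ?_, le_rfl, by norm_num, (pvM_zero dna).symm⟩
    rw [PySem.List.pyRange_one_eq_nil (by norm_num), List.foldl_nil]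
    have hrep : List.replicate dna.toList.length 0 = pvStateL dna (1 + ((0 : Nat) : Int)) := by
      apply List.ext_getElem
      · rw [List.length_replicate, pvStateL_length]
      intro i hi1 hi2
      rw [List.getElem_replicate, pvStateL_getElem _ _ _ hi2]
      by_cases hi : i = 0
      · subst hi
        rw [if_pos (by norm_num)]
        exact (pvM_zero dna).symm
      · rw [if_neg (by push_cast; omega)]
    rw [hrep]
  | succ k ih =>
    obtain ⟨p, hl, heq, hp0, hpc, hhl⟩ := ih (by push_cast at hk ⊢; omega)
    have hc1 : (1 : Int) + ((k + 1 : Nat) : Int) = (1 + (k : Int)) + 1 := by push_cast; ring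
    rw [hc1, PySem.List.pyRange_one_succ_right (by omega), List.foldl_append, List.foldl_cons,
      List.foldl_nil, heq]
    obtain ⟨p', hl', heq', hp0', hpc', hhl'⟩ :=
      pvStep_good dna (1 + (k : Int)) p hl (by omega) (by push_cast at hk; omega) hp0 hpc hhl
    exact ⟨p', hl', heq', hp0', by omega, hhl'⟩

-- B-side: the leading-match predicate of pvLcp and its characterization
def pvMatchAt (xs : List Char) (ys : List (Option Char)) (j : Nat) : Prop :=
  ∃ x, xs[j]? = some x ∧ ys[j]? = some (some x)

theorem pvLcp_nonneg : ∀ (xs : List Char) (ys : List (Option Char)), 0 ≤ pvLcp xs ys := by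
  intro xs
  induction xs with
  | nil => intro ys; cases ys <;> simp [pvLcp]
  | cons x xs ih =>
    intro ys
    cases ys with
    | nil => simp [pvLcp]
    | cons y ys =>
      rw [pvLcp]
      split_ifs with h
      · have := ih ys; omega
      · omega

theorem pvLcp_spec : ∀ (xs : List Char) (ys : List (Option Char)),
    (∀ j : Nat, (j : Int) < pvLcp xs ys → pvMatchAt xs ys j) ∧
      ¬ pvMatchAt xs ys (pvLcp xs ys).toNat := by
  intro xs
  induction xs with
  | nil =>
    intro ys
    have h0 : pvLcp [] ys = 0 := by cases ys <;> rfl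
    refine ⟨fun j hj => absurd hj (by rw [h0]; omega), ?_⟩
    rintro ⟨z, hz1, hz2⟩
    simp at hz1
  | cons x xs ih =>
    intro ys
    cases ys with
    | nil =>
      refine ⟨fun j hj => absurd hj (by simp [pvLcp]), ?_⟩
      rintro ⟨z, hz1, hz2⟩
      simp at hz2
    | cons y ys =>
      obtain ⟨ih1, ih2⟩ := ih ys
      rw [pvLcp]
      split_ifs with h
      · constructor
        · intro j hj
          match j with
          | 0 => exact ⟨x, rfl, by simp [h]⟩
          | j + 1 =>
            obtain ⟨z, hz1, hz2⟩ := ih1 j (by push_cast at hj ⊢; omega)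
            exact ⟨z, by simpa using hz1, by simpa using hz2⟩
        · have ht : (1 + pvLcp xs ys).toNat = (pvLcp xs ys).toNat + 1 := by
            have := pvLcp_nonneg xs ys; omega
          rw [ht]
          rintro ⟨z, hz1, hz2⟩
          exact ih2 ⟨z, by simpa using hz1, by simpa using hz2⟩
      · refine ⟨fun j hj => absurd hj (by omega), ?_⟩
        rintro ⟨z, hz1, hz2⟩
        simp only [Int.toNat_zero, List.getElem?_cons_zero, Option.some_inj] at hz1 hz2
        exact h (by rw [hz2, hz1])

-- index computations for B's two lists
theorem pvRevTake_get (l : List Char) (c j : Nat) (hj : j < c) (hc : c ≤ l.length) :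
    ((l.take c).reverse)[j]? = some (l[c - 1 - j]'(by omega)) := by
  have hlt : (l.take c).length = c := by rw [List.length_take]; omega
  rw [List.getElem?_eq_getElem (by rw [List.length_reverse, hlt]; omega)]
  rw [List.getElem_reverse, List.getElem_take]
  simp [hlt]

theorem pvDropMap_get (l : List Char) (c j : Nat) (h : c + j < l.length) :
    ((l.map pvComplement).drop c)[j]? = some (pvComplement (l[c + j]'h)) := by
  rw [List.getElem?_eq_getElem (by rw [List.length_drop, List.length_map]; omega)]
  rw [List.getElem_drop, List.getElem_map]

theorem pvSg_eq (dna : String) (i : Nat) (h : i < dna.toList.length) :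
    pvSg dna (i : Int) = dna.toList[i]'h := by
  unfold pvSg
  rw [Int.toNat_natCast, List.getD_eq_getElem _ _ h]

-- connect B's match predicate at center c to A's expansion condition
theorem pvMatch_iff_Cc (dna : String) (c : Nat) (hc : c ≤ dna.toList.length) (j : Nat) :
    pvMatchAt (dna.toList.take c).reverse ((dna.toList.map pvComplement).drop c) j ↔
      pvCc dna (c : Int) (j : Int) := by
  rw [pvCc_iff (by positivity)]
  constructor
  · rintro ⟨x, hx1, hx2⟩
    have hj1 : j < c := by
      by_contra hcon
      rw [List.getElem?_eq_none
        (by rw [List.length_reverse, List.length_take]; omega)] at hx1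
      simp at hx1
    have hj2 : c + j < dna.toList.length := by
      by_contra hcon
      rw [List.getElem?_eq_none
        (by rw [List.length_drop, List.length_map]; omega)] at hx2
      simp at hx2
    refine ⟨by omega, by omega, ?_⟩
    rw [pvRevTake_get _ _ _ hj1 hc] at hx1
    rw [pvDropMap_get _ _ _ hj2] at hx2
    rw [Option.some_inj] at hx1 hx2
    have e1 : pvSg dna ((c : Int) + j) = dna.toList[c + j]'hj2 := by
      rw [show ((c : Int) + j) = ((c + j : Nat) : Int) from by push_cast; ring]
      exact pvSg_eq dna (c + j) hj2
    have e2 : pvSg dna ((c : Int) - j - 1) = dna.toList[c - 1 - j]'(by omega) := by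
      rw [show ((c : Int) - j - 1) = ((c - 1 - j : Nat) : Int) from by omega]
      exact pvSg_eq dna (c - 1 - j) (by omega)
    rw [e1, e2, hx2, hx1]
  · rintro ⟨h1, h2, h3⟩
    have hj1 : j < c := by omega
    have hj2 : c + j < dna.toList.length := by omega
    refine ⟨dna.toList[c - 1 - j]'(by omega), pvRevTake_get _ _ _ hj1 hc, ?_⟩
    rw [pvDropMap_get _ _ _ hj2, Option.some_inj]
    have e1 : pvSg dna ((c : Int) + j) = dna.toList[c + j]'hj2 := by
      rw [show ((c : Int) + j) = ((c + j : Nat) : Int) from by push_cast; ring]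
      exact pvSg_eq dna (c + j) hj2
    have e2 : pvSg dna ((c : Int) - j - 1) = dna.toList[c - 1 - j]'(by omega) := by
      rw [show ((c : Int) - j - 1) = ((c - 1 - j : Nat) : Int) from by omega]
      exact pvSg_eq dna (c - 1 - j) (by omega)
    rw [← e1, ← e2, h3]

theorem pvLcp_eq_pvM (dna : String) (c : Nat) (hc : c ≤ dna.toList.length) :
    pvLcp (dna.toList.take c).reverse ((dna.toList.map pvComplement).drop c) = pvM dna (c : Int) := by
  set L := pvLcp (dna.toList.take c).reverse ((dna.toList.map pvComplement).drop c) with hL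
  have hL0 : 0 ≤ L := pvLcp_nonneg _ _
  obtain ⟨hall, hmax⟩ := pvLcp_spec (dna.toList.take c).reverse ((dna.toList.map pvComplement).drop c)
  have hM0 := pvM_nonneg dna (c : Int)
  rcases lt_trichotomy L (pvM dna (c : Int)) with h | h | h
  · exfalso
    apply hmax
    rw [pvMatch_iff_Cc dna c hc]
    have hcast : (L.toNat : Int) = L := by omega
    rw [hcast]
    exact pvM_cond dna (c : Int) L hL0 h
  · exact h
  · exfalso
    apply pvM_max dna (c : Int)
    have hcast : ((pvM dna (c : Int)).toNat : Int) = pvM dna (c : Int) := by omega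
    rw [← hcast, ← pvMatch_iff_Cc dna c hc]
    exact hall _ (by omega)

theorem pvFinal (dna : String) : modified_manacher dna = modified_manacher_alt dna := by
  unfold modified_manacher modified_manacher_alt
  rw [pvLen_eq]
  have hB : (List.range dna.toList.length).map (fun c : Nat =>
      pvLcp (dna.toList.take c).reverse ((dna.toList.map pvComplement).drop c)) =
      (List.range dna.toList.length).map (fun c : Nat => pvM dna (c : Int)) := by
    apply List.map_congr_left
    intro c hcmem
    exact pvLcp_eq_pvM dna c (le_of_lt (List.mem_range.mp hcmem))
  by_cases hn : dna.toList.length = 0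
  · rw [hn]
    rw [PySem.List.pyRange_one_eq_nil (by norm_num), List.foldl_nil]
    simp
  · have hn1 : 1 ≤ dna.toList.length := by omega
    have hfold := pvFold_inv dna (dna.toList.length - 1) (by omega)
    have hcast : (1 : Int) + ((dna.toList.length - 1 : Nat) : Int) = (dna.toList.length : Int) := by
      omega
    rw [hcast] at hfold
    obtain ⟨p, hl, heq, -, -, -⟩ := hfold
    rw [show ((dna.toList.length : Int)).toNat = dna.toList.length from by omega, heq]
    show pvStateL dna (dna.toList.length : Int) = _
    rw [hB]
    apply List.ext_getElem
    · rw [pvStateL_length, List.length_map, List.length_range]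
    intro i hi1 hi2
    rw [pvStateL_getElem _ _ _ hi1, if_pos (by rw [pvStateL_length] at hi1; omega),
      List.getElem_map, List.getElem_range]

-- ===== VERDICT (by name: the statement is the Claim_ definition above) =====
theorem modified_manacher_spec : Claim_equal_modified_manacher := by
  intro dna _
  unfold Spec_modified_manacher
  exact pvFinal dna
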